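-- pv_equiv track=rewrite | github.com/akashchauhan99/Python-Assignments | ElementsCheck.py | ElementCheck
-- ===== SOURCE A (Python) =====
-- from collections import Counter
--
-- def ElementCheck(listCheck):
--     first = listCheck[0].lower()
--     second = listCheck[1].lower()
--
--     counter_First = Counter(first)
--     counter_second = Counter(second)
--
--     for ch in counter_second:
--         if counter_First[ch] != counter_second[ch]:
--             return False
--     return True
-- ===== SOURCE B (Python) =====
-- def ElementCheck(listCheck):
--     first = listCheck[0].lower()
--     second = listCheck[1].lower()
--     relevant = [ch for ch in first if ch in second]
--     return sorted(relevant) == sorted(second)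
-- ===== Notes on version B (the rewrite author's own statement) =====
-- stated objective: alternative
-- what changed: Replaces the frequency-table comparison with sort-and-compare: filter the first string to the characters occurring in the second, then test sorted(filtered) == sorted(second); multiset equality of the filtered string with the second string is exactly the per-character count condition A checks, with no counting performed.
import Mathlib
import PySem

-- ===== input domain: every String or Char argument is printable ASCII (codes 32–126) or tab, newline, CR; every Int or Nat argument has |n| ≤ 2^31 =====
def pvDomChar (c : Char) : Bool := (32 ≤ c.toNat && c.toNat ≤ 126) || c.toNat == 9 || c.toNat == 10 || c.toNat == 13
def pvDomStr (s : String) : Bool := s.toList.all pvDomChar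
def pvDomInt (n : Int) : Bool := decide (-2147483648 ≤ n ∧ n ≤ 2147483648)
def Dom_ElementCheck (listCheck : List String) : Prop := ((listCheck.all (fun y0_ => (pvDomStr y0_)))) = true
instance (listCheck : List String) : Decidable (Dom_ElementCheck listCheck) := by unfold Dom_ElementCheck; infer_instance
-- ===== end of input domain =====

-- B replaces the frequency-table comparison by sort-and-compare: filter the first string to the
-- characters occurring in the second and test sorted(filtered) == sorted(second) (objective: alternative).

-- ===== PORT A =====
def ElementCheck (listCheck : List String) : Bool :=
  let first := PySem.Str.lower (PySem.List.pyGetD listCheck 0 "")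
  let second := PySem.Str.lower (PySem.List.pyGetD listCheck 1 "")
  let counterFirst : PySem.Dict Char Int := PySem.Dict.counter first.toList
  let counterSecond : PySem.Dict Char Int := PySem.Dict.counter second.toList
  -- 'for ch in counter_second: if …: return False / return True' == all keys satisfy the test
  counterSecond.keys.all (fun ch => counterFirst.getD ch 0 == counterSecond.getD ch 0)

-- ===== PORT B =====
def ElementCheck_alt (listCheck : List String) : Bool :=
  let first := PySem.Str.lower (PySem.List.pyGetD listCheck 0 "")
  let second := PySem.Str.lower (PySem.List.pyGetD listCheck 1 "")
  -- '[ch for ch in first if ch in second]'; 'ch in second' is PySem.Str.isIn on the 1-char string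
  let relevant := first.toList.filter (fun ch => PySem.Str.isIn (String.singleton ch) second)
  -- 'sorted(relevant) == sorted(second)'
  PySem.List.sorted relevant (fun x => x) == PySem.List.sorted second.toList (fun x => x)

-- ===== PRECONDITION & SPEC =====
-- A (and B) raise IndexError when the list has fewer than two elements.
def Pre_ElementCheck (listCheck : List String) : Prop := 2 ≤ listCheck.length
instance (listCheck : List String) : Decidable (Pre_ElementCheck listCheck) := by unfold Pre_ElementCheck; infer_instance
def pvWitness_ElementCheck : List String := ["aB b", "b Ba"]

def Spec_ElementCheck (listCheck : List String) (out : Bool) : Prop := out = ElementCheck_alt listCheck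
instance (listCheck : List String) (out : Bool) : Decidable (Spec_ElementCheck listCheck out) := by unfold Spec_ElementCheck; infer_instance

-- ===== CLAIM (what is proved, stated in full; the proofs are below) =====
def Claim_equal_ElementCheck : Prop := ∀ (listCheck : List String), Dom_ElementCheck listCheck → Pre_ElementCheck listCheck → Spec_ElementCheck listCheck (ElementCheck listCheck)

-- ===== LEMMAS AND PROOFS =====

theorem isIn_singleton (c : Char) (s : String) :
    PySem.Str.isIn (String.singleton c) s = s.toList.contains c := by
  rw [Bool.eq_iff_iff]
  simp [PySem.Chars.isIn_iff_infix, List.singleton_infix_iff]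

theorem count_filter_mem (f s : List Char) (c : Char) :
    (f.filter (fun ch => s.contains ch)).count c = if c ∈ s then f.count c else 0 := by
  by_cases h : c ∈ s
  · rw [List.count_filter (by simpa using h)]; simp [h]
  · simp only [h, if_false]
    rw [List.count_eq_zero]
    intro hmem
    have := List.of_mem_filter hmem
    simp at this
    exact h this

theorem counts_eq_sorted (first second : String) :
    ((PySem.Dict.counter second.toList).keys.all (fun ch =>
        (PySem.Dict.counter first.toList).getD ch 0 == (PySem.Dict.counter second.toList).getD ch 0))
    = ((PySem.List.sorted (first.toList.filter (fun ch => PySem.Str.isIn (String.singleton ch) second)) (fun x => x))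
        == PySem.List.sorted second.toList (fun x => x)) := by
  rw [Bool.eq_iff_iff]
  simp only [List.all_eq_true, PySem.Dict.keys_counter, PySem.Dict.getD_counter, beq_iff_eq,
    isIn_singleton, PySem.Set.mem_ofList, Nat.cast_inj,
    PySem.List.sorted_id_eq_sorted_id_iff_perm, List.perm_iff_count, count_filter_mem]
  constructor
  · intro h c
    by_cases hc : c ∈ second.toList
    · simpa [hc] using h c hc
    · rw [if_neg hc]
      exact (List.count_eq_zero.mpr hc).symm
  · intro h c hc
    have := h c
    simpa [hc] using this

theorem ElementCheck_eq (listCheck : List String) :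
    ElementCheck listCheck = ElementCheck_alt listCheck := by
  unfold ElementCheck ElementCheck_alt
  exact counts_eq_sorted _ _

-- ===== VERDICT (by name: the statement is the Claim_ definition above) =====
theorem ElementCheck_spec : Claim_equal_ElementCheck := by
  intro l _ _
  exact ElementCheck_eq l
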